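-- pv_equiv track=rewrite | github.com/mpuma-conti/python-renewable-energy-book | Chapter 10/11 vehicle_to_grid.py | v2g_control
-- ===== SOURCE A (Python) =====
-- energia_disponible = 20  # Energía inicial disponible en kWh
--
-- demanda_red = [0, 5, 10, 15, 10, 5, 0]  # kW por hora durante 7 horas
--
-- def v2g_control(energia_disponible, demanda_red):
--     flujo_energia = []
--     for demanda in demanda_red:
--         if demanda > 0 and energia_disponible > 0:
--             energia_a_entregar = min(demanda, energia_disponible)
--             flujo_energia.append(-energia_a_entregar)  # Energía entregada a la red
--             energia_disponible -= energia_a_entregar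
--         else:
--             flujo_energia.append(0)  # No hay entrega
--     return flujo_energia
-- ===== SOURCE B (Python) =====
-- from itertools import accumulate
--
-- def v2g_control(energia_disponible, demanda_red):
--     # Pass 1: trajectory of remaining energy after each hour.
--     niveles = list(accumulate(
--         demanda_red,
--         lambda rem, d: rem - min(d, rem) if d > 0 and rem > 0 else rem,
--         initial=energia_disponible))
--     # Pass 2: flows are the negated consecutive differences of the levels.
--     return [cur - prev for prev, cur in zip(niveles, niveles[1:])]
-- ===== Notes on version B (the rewrite author's own statement) =====
-- stated objective: alternative
-- what changed: Replaces the fused in-loop update with a two-pass formulation: first itertools.accumulate builds the remaining-energy level sequence, then the flows are derived as negated consecutive differences of the levels.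
import Mathlib
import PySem

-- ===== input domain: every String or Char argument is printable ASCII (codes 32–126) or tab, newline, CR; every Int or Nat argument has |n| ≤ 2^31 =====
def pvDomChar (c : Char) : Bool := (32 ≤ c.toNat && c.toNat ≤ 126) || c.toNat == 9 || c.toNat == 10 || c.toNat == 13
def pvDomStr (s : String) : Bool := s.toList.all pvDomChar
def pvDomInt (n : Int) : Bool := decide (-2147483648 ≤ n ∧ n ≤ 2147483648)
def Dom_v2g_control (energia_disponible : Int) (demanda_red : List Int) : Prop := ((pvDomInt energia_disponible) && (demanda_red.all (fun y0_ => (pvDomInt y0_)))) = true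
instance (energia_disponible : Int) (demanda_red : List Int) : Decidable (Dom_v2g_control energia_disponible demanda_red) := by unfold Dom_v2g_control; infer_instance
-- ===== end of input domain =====

-- B: two-pass alternative — build the remaining-energy level sequence, then take negated
-- consecutive differences; same cost, different decomposition.
-- ===== PORT A =====
-- loop over demanda_red with state (flujo_energia, energia_disponible); list append via ++ [x]
def v2g_control (energia_disponible : Int) (demanda_red : List Int) : List Int :=
  (demanda_red.foldl
    (fun (st : List Int × Int) demanda =>
      if demanda > 0 ∧ st.2 > 0 then
        let energia_a_entregar := min demanda st.2
        (st.1 ++ [-energia_a_entregar], st.2 - energia_a_entregar)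
      else
        (st.1 ++ [0], st.2))
    ([], energia_disponible)).1

-- ===== PORT B =====
-- the accumulate reducer
def v2gStep (rem d : Int) : Int :=
  if d > 0 ∧ rem > 0 then rem - min d rem else rem

-- list(accumulate(ds, v2gStep, initial=e)) : the level after each hour, with the initial level first
def v2gLevels (e : Int) : List Int → List Int
  | [] => [e]
  | d :: ds => e :: v2gLevels (v2gStep e d) ds

def v2g_control_alt (energia_disponible : Int) (demanda_red : List Int) : List Int :=
  let niveles := v2gLevels energia_disponible demanda_red
  List.zipWith (fun prev cur => cur - prev) niveles niveles.tail

-- ===== PRECONDITION & SPEC =====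
def Spec_v2g_control (energia_disponible : Int) (demanda_red : List Int) (out : List Int) : Prop := out = v2g_control_alt energia_disponible demanda_red
instance (energia_disponible : Int) (demanda_red : List Int) (out : List Int) : Decidable (Spec_v2g_control energia_disponible demanda_red out) := by unfold Spec_v2g_control; infer_instance

-- ===== CLAIM (what is proved, stated in full; the proofs are below) =====
def Claim_equal_v2g_control : Prop := ∀ (energia_disponible : Int) (demanda_red : List Int), Dom_v2g_control energia_disponible demanda_red → Spec_v2g_control energia_disponible demanda_red (v2g_control energia_disponible demanda_red)

-- ===== LEMMAS AND PROOFS =====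

-- ===== VERDICT (by name: the statement is the Claim_ definition above) =====
theorem foldl_acc (demanda_red : List Int) :
    ∀ (e : Int) (acc : List Int),
      (demanda_red.foldl
        (fun (st : List Int × Int) demanda =>
          if demanda > 0 ∧ st.2 > 0 then
            let energia_a_entregar := min demanda st.2
            (st.1 ++ [-energia_a_entregar], st.2 - energia_a_entregar)
          else
            (st.1 ++ [0], st.2))
        (acc, e)).1
      = acc ++ List.zipWith (fun prev cur => cur - prev) (v2gLevels e demanda_red) (v2gLevels e demanda_red).tail := by
  induction demanda_red with
  | nil => intro e acc; simp [v2gLevels]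
  | cons d ds ih =>
    intro e acc
    by_cases h : d > 0 ∧ e > 0
    · simp only [List.foldl_cons, if_pos h, ih, v2gLevels, v2gStep, List.tail_cons]
      cases ds with
      | nil =>
        simp [v2gLevels]
      | cons d' ds' =>
        simp only [v2gLevels, List.zipWith, List.tail_cons, List.append_assoc, List.cons_append,
          List.nil_append]
        congr 2
        simp
    · simp only [List.foldl_cons, if_neg h, ih, v2gLevels, v2gStep, List.tail_cons]
      cases ds with
      | nil => simp [v2gLevels]
      | cons d' ds' =>
        simp [v2gLevels]

theorem v2g_control_spec : Claim_equal_v2g_control := by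
  intro e ds _
  unfold Spec_v2g_control v2g_control v2g_control_alt
  simpa using foldl_acc ds e []
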